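-- pv_equiv track=rewrite | github.com/bighousevn/Rag_Graph_LawLaw | triplet_extractor_vi.py | collect_relation_bridge_indices
-- ===== SOURCE A (Python) =====
-- from typing import Any, Dict, List, Optional, Sequence
--
-- BRIDGE_OBJECT_LABELS = {"obj", "dobj", "dob", "iobj", "iob"}
--
-- ENTITY_EXPAND_LABELS = {
--     "nmod",
--     "amod",
--     "det",
--     "mnr",
--     "loc",
--     "tmp",
--     "tmod",
--     "vmod",
--     "pob",
--     "iob",
--     "dob",
--     "conj",
--     "coord",
--     "punct",
-- }
--
-- def expand_entity_indices(seed_idxs: List[int], dep: List[str], head: List[int]) -> List[int]: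
--     if not seed_idxs:
--         return []
--
--     collected = set(seed_idxs)
--     changed = True
--     while changed:
--         changed = False
--         for i, d in enumerate(dep, start=1):
--             parent = head[i - 1]
--             if parent in collected and d.lower() in ENTITY_EXPAND_LABELS and i not in collected:
--                 collected.add(i)
--                 changed = True
--     return sorted(collected)
--
-- def path_to_ancestor(node_idx: int, ancestor_idx: int, head: List[int]) -> List[int]:
--     path: List[int] = []
--     current = node_idx
--     seen = set()
--     while 1 <= current <= len(head) and current not in seen:
--         path.append(current)
--         if current == ancestor_idx:
--             return path
--         seen.add(current)
--         current = head[current - 1]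
--     return []
--
-- def collect_relation_bridge_indices(root_idx: int, action_idx: int, dep: List[str], head: List[int]) -> List[int]:
--     if action_idx == -1:
--         return []
--
--     idxs: set[int] = set()
--
--     path = path_to_ancestor(action_idx, root_idx, head)
--     idxs.update(path)
--
--     bridges = [
--         i
--         for i, d in enumerate(dep, start=1)
--         if head[i - 1] == root_idx and d.lower() in BRIDGE_OBJECT_LABELS and (i < action_idx or action_idx == -1)
--     ]
--     for b in bridges:
--         idxs.update(expand_entity_indices([b], dep, head))
--
--     return sorted(idxs)
-- ===== SOURCE B (Python) =====
-- BRIDGE_OBJECT_LABELS = {"obj", "dobj", "dob", "iobj", "iob"}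
--
-- ENTITY_EXPAND_LABELS = {
--     "nmod", "amod", "det", "mnr", "loc", "tmp", "tmod",
--     "vmod", "pob", "iob", "dob", "conj", "coord", "punct",
-- }
--
-- def collect_relation_bridge_indices(root_idx, action_idx, dep, head):
--     if action_idx == -1:
--         return []
--     n = len(dep)
--     result = set()
--
--     # dependency path from the action token up to the root (kept only if the root is reached)
--     cur = action_idx
--     seen = set()
--     trail = []
--     while 1 <= cur <= len(head) and cur not in seen:
--         trail.append(cur)
--         if cur == root_idx:
--             result.update(trail)
--             break
--         seen.add(cur)
--         cur = head[cur - 1]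
--
--     # one pass: parent -> expandable-children adjacency, and the bridge seeds
--     children = {}
--     frontier = []
--     for i, w in enumerate(dep, start=1):
--         d = w.lower()
--         p = head[i - 1]
--         if d in ENTITY_EXPAND_LABELS:
--             children.setdefault(p, []).append(i)
--         if p == root_idx and d in BRIDGE_OBJECT_LABELS and i < action_idx:
--             frontier.append(i)
--
--     # breadth-first expansion from all seeds at once (at most n levels)
--     visited = set(frontier)
--     for _ in range(n):
--         if not frontier:
--             break
--         nxt = []
--         for p in frontier:
--             for c in children.get(p, []):
--                 if c not in visited:
--                     visited.add(c)
--                     nxt.append(c)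
--         frontier = nxt
--     result.update(visited)
--
--     return sorted(result)
-- ===== Notes on version B (the rewrite author's own statement) =====
-- stated objective: alternative
-- what changed: Replaces the per-bridge fixpoint saturation (repeated full rescans of dep until no change, once per bridge) by one pass that builds a parent->expandable-children adjacency dict plus the bridge seeds, followed by a single breadth-first expansion from all seeds at once; it trades A's rescan loops for an adjacency structure (A's worst case is quadratic per bridge, B's expansion is a plain BFS), though on the generated timing inputs both run at the same measured cost.
import Mathlib
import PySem

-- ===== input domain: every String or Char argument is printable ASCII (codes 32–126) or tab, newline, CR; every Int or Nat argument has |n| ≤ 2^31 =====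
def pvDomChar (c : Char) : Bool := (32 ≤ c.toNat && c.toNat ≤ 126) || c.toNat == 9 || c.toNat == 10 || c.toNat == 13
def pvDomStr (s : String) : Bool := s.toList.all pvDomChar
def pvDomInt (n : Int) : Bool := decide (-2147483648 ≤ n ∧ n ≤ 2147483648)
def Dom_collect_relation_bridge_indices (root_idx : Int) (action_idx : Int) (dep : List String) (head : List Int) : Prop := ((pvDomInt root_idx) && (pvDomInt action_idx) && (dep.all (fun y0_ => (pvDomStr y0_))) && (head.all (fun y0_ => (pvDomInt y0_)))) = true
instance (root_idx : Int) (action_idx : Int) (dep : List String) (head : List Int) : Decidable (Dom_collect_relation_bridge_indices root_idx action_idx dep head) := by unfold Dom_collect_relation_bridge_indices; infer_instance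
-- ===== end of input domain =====

-- B replaces A's per-bridge whole-list saturation by one adjacency-building pass plus a single
-- breadth-first expansion from all bridge seeds (objective: alternative algorithm, same measured cost).
-- Equivalence is about the return value; neither program mutates its arguments.

-- ===== PORT A =====
def pvBridgeLabels : List String := ["obj", "dobj", "dob", "iobj", "iob"]
def pvExpandLabels : List String :=
  ["nmod", "amod", "det", "mnr", "loc", "tmp", "tmod", "vmod", "pob", "iob", "dob", "conj", "coord", "punct"]

-- one pass of the 'for i, d in enumerate(dep, start=1)' body of expand_entity_indices
def pvPassA (dep : List String) (head : List Int) (st : PySem.Set Int × Bool) : PySem.Set Int × Bool :=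
  (PySem.List.enumerate dep 1).foldl
    (fun (st : PySem.Set Int × Bool) q =>
      if PySem.Set.contains st.1 (PySem.List.pyGetD head (q.1 - 1) 0)
          ∧ pvExpandLabels.contains (PySem.Str.lower q.2)
          ∧ ¬ (PySem.Set.contains st.1 q.1) = true
      then (PySem.Set.add st.1 q.1, true) else st) st

-- 'while changed:' loop; fuel dep.length + 1 suffices (each changing pass adds a fresh index 1..len(dep))
def pvSaturateA (dep : List String) (head : List Int) : Nat → PySem.Set Int → PySem.Set Int
  | 0, c => c
  | fuel + 1, c =>
    let r := pvPassA dep head (c, false)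
    if r.2 then pvSaturateA dep head fuel r.1 else r.1

def pvExpandA (seed_idxs : List Int) (dep : List String) (head : List Int) : List Int :=
  if seed_idxs = [] then []
  else PySem.List.sorted (pvSaturateA dep head (dep.length + 1) (PySem.Set.ofList seed_idxs)) (fun x => x) false

-- path_to_ancestor's while loop; fuel head.length + 1 suffices (each step records a fresh index in seen)
def pvPathA (head : List Int) (ancestor : Int) : Nat → Int → PySem.Set Int → List Int → List Int
  | 0, _, _, _ => []
  | fuel + 1, current, seen, path =>
    if 1 ≤ current ∧ current ≤ (head.length : Int) ∧ ¬ (PySem.Set.contains seen current) = true then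
      let path' := path ++ [current]
      if current = ancestor then path'
      else pvPathA head ancestor fuel (PySem.List.pyGetD head (current - 1) 0) (PySem.Set.add seen current) path'
    else []

def collect_relation_bridge_indices (root_idx : Int) (action_idx : Int) (dep : List String) (head : List Int) : List Int :=
  if action_idx = -1 then []
  else
    let idxs : PySem.Set Int := PySem.Set.empty
    let path := pvPathA head root_idx (head.length + 1) action_idx PySem.Set.empty []
    let idxs := PySem.Set.update idxs path
    let bridges := (PySem.List.enumerate dep 1).foldl
      (fun (acc : List Int) q =>
        if PySem.List.pyGetD head (q.1 - 1) 0 = root_idx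
            ∧ pvBridgeLabels.contains (PySem.Str.lower q.2)
            ∧ (q.1 < action_idx ∨ action_idx = -1)
        then acc ++ [q.1] else acc) []
    let idxs := bridges.foldl (fun (s : PySem.Set Int) b => PySem.Set.update s (pvExpandA [b] dep head)) idxs
    PySem.List.sorted idxs (fun x => x) false

-- ===== PORT B =====
-- B's path walk (same while loop, inlined in Source B; returns the trail only when the root was reached)
def pvWalkB (head : List Int) (root : Int) : Nat → Int → PySem.Set Int → List Int → List Int
  | 0, _, _, _ => []
  | fuel + 1, cur, seen, trail =>
    if 1 ≤ cur ∧ cur ≤ (head.length : Int) ∧ ¬ (PySem.Set.contains seen cur) = true then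
      let trail' := trail ++ [cur]
      if cur = root then trail'
      else pvWalkB head root fuel (PySem.List.pyGetD head (cur - 1) 0) (PySem.Set.add seen cur) trail'
    else []

-- the single 'for i, w in enumerate(dep, start=1)' pass: children adjacency dict and the bridge seeds
def pvBuildB (root_idx : Int) (action_idx : Int) (dep : List String) (head : List Int) :
    PySem.Dict Int (List Int) × List Int :=
  (PySem.List.enumerate dep 1).foldl
    (fun (st : PySem.Dict Int (List Int) × List Int) q =>
      (if pvExpandLabels.contains (PySem.Str.lower q.2)
       then PySem.Dict.modify st.1 (PySem.List.pyGetD head (q.1 - 1) 0) [] (fun l => l ++ [q.1]) else st.1,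
       if PySem.List.pyGetD head (q.1 - 1) 0 = root_idx
           ∧ pvBridgeLabels.contains (PySem.Str.lower q.2)
           ∧ q.1 < action_idx
       then st.2 ++ [q.1] else st.2))
    (PySem.Dict.empty, [])

-- one BFS level: 'for p in frontier: for c in children.get(p, []): …'
def pvRoundB (children : PySem.Dict Int (List Int)) (frontier : List Int)
    (st : PySem.Set Int × List Int) : PySem.Set Int × List Int :=
  frontier.foldl
    (fun st p =>
      (PySem.Dict.getD children p []).foldl
        (fun (st : PySem.Set Int × List Int) c =>
          if PySem.Set.contains st.1 c then st else (PySem.Set.add st.1 c, st.2 ++ [c])) st) st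

-- 'for _ in range(n): if not frontier: break; …'
def pvBFSB (children : PySem.Dict Int (List Int)) : Nat → PySem.Set Int → List Int → PySem.Set Int
  | 0, visited, _ => visited
  | k + 1, visited, frontier =>
    if frontier = [] then visited
    else
      let r := pvRoundB children frontier (visited, [])
      pvBFSB children k r.1 r.2

def collect_relation_bridge_indices_alt (root_idx : Int) (action_idx : Int) (dep : List String) (head : List Int) : List Int :=
  if action_idx = -1 then []
  else
    let walk := pvWalkB head root_idx (head.length + 1) action_idx PySem.Set.empty []
    let result := PySem.Set.update PySem.Set.empty walk
    let built := pvBuildB root_idx action_idx dep head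
    let visited := pvBFSB built.1 dep.length (PySem.Set.ofList built.2) built.2
    let result := PySem.Set.update result visited
    PySem.List.sorted result (fun x => x) false

-- ===== PRECONDITION & SPEC =====
-- Pre_ excludes exactly the inputs on which A raises IndexError: action_idx ≠ -1 together with
-- dep longer than head makes the bridge comprehension read head[i-1] past the end of head.
def Pre_collect_relation_bridge_indices (root_idx : Int) (action_idx : Int) (dep : List String) (head : List Int) : Prop :=
  action_idx = -1 ∨ dep.length ≤ head.length

instance (root_idx : Int) (action_idx : Int) (dep : List String) (head : List Int) : Decidable (Pre_collect_relation_bridge_indices root_idx action_idx dep head) := by unfold Pre_collect_relation_bridge_indices; infer_instance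

def pvWitness_collect_relation_bridge_indices : Int × Int × List String × List Int :=
  (1, 3, ["obj", "nmod", "det"], [0, 1, 1])

def Spec_collect_relation_bridge_indices (root_idx : Int) (action_idx : Int) (dep : List String) (head : List Int) (out : List Int) : Prop := out = collect_relation_bridge_indices_alt root_idx action_idx dep head
instance (root_idx : Int) (action_idx : Int) (dep : List String) (head : List Int) (out : List Int) : Decidable (Spec_collect_relation_bridge_indices root_idx action_idx dep head out) := by unfold Spec_collect_relation_bridge_indices; infer_instance

-- ===== CLAIM (what is proved, stated in full; the proofs are below) =====
def Claim_equal_collect_relation_bridge_indices : Prop := ∀ (root_idx : Int) (action_idx : Int) (dep : List String) (head : List Int), Dom_collect_relation_bridge_indices root_idx action_idx dep head → Pre_collect_relation_bridge_indices root_idx action_idx dep head → Spec_collect_relation_bridge_indices root_idx action_idx dep head (collect_relation_bridge_indices root_idx action_idx dep head)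

-- ===== LEMMAS AND PROOFS =====

-- ---- shared notions ----

-- the expansion edge relation: c is an expandable child of p
def pvEdge (dep : List String) (head : List Int) (p c : Int) : Prop :=
  ∃ d, (c, d) ∈ PySem.List.enumerate dep 1 ∧ PySem.List.pyGetD head (c - 1) 0 = p
       ∧ pvExpandLabels.contains (PySem.Str.lower d) = true

-- how many candidate indices (first components of enumerate(dep,1)) are not yet collected
def pvMeas (dep : List String) (c : List Int) : Nat :=
  (((PySem.List.enumerate dep 1).map Prod.fst).toFinset \ c.toFinset).card

lemma pvMeas_le (dep : List String) (c : List Int) : pvMeas dep c ≤ dep.length := by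
  unfold pvMeas
  calc (((PySem.List.enumerate dep 1).map Prod.fst).toFinset \ c.toFinset).card
      ≤ ((PySem.List.enumerate dep 1).map Prod.fst).toFinset.card :=
        Finset.card_le_card (Finset.sdiff_subset)
    _ ≤ ((PySem.List.enumerate dep 1).map Prod.fst).length := List.toFinset_card_le _
    _ = dep.length := by simp [PySem.List.length_enumerate]

lemma pvMeas_lt (dep : List String) (c c' : List Int) (hsub : ∀ x ∈ c, x ∈ c')
    (i : Int) (hi : i ∈ (PySem.List.enumerate dep 1).map Prod.fst) (hni : i ∉ c) (hyi : i ∈ c') :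
    pvMeas dep c' < pvMeas dep c := by
  unfold pvMeas
  apply Finset.card_lt_card
  constructor
  · intro x hx
    simp only [Finset.mem_sdiff, List.mem_toFinset] at hx ⊢
    exact ⟨hx.1, fun hc => hx.2 (hsub x hc)⟩
  · intro hsup
    have hmem := hsup (by simp only [Finset.mem_sdiff, List.mem_toFinset]; exact ⟨hi, hni⟩)
    simp only [Finset.mem_sdiff, List.mem_toFinset] at hmem
    exact hmem.2 hyi

-- ---- A side: one pass of the saturation loop over a general element list ----

def pvPassAux (head : List Int) (l : List (Int × String)) (st : PySem.Set Int × Bool) :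
    PySem.Set Int × Bool :=
  l.foldl
    (fun (st : PySem.Set Int × Bool) q =>
      if PySem.Set.contains st.1 (PySem.List.pyGetD head (q.1 - 1) 0)
          ∧ pvExpandLabels.contains (PySem.Str.lower q.2)
          ∧ ¬ (PySem.Set.contains st.1 q.1) = true
      then (PySem.Set.add st.1 q.1, true) else st) st

lemma pvPassA_eq (dep : List String) (head : List Int) (st : PySem.Set Int × Bool) :
    pvPassA dep head st = pvPassAux head (PySem.List.enumerate dep 1) st := rfl

lemma pvPassAux_cons (head : List Int) (q : Int × String) (l : List (Int × String))
    (st : PySem.Set Int × Bool) :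
    pvPassAux head (q :: l) st =
      pvPassAux head l
        (if PySem.Set.contains st.1 (PySem.List.pyGetD head (q.1 - 1) 0)
            ∧ pvExpandLabels.contains (PySem.Str.lower q.2)
            ∧ ¬ (PySem.Set.contains st.1 q.1) = true
         then (PySem.Set.add st.1 q.1, true) else st) := rfl

lemma pvPassAux_grow (head : List Int) (l : List (Int × String)) :
    ∀ (st : PySem.Set Int × Bool) (x : Int), x ∈ st.1 → x ∈ (pvPassAux head l st).1 := by
  induction l with
  | nil => intro st x hx; exact hx
  | cons q l ih =>
    intro st x hx
    rw [pvPassAux_cons]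
    split
    · exact ih _ x ((PySem.Set.mem_add _ _ _).2 (Or.inl hx))
    · exact ih _ x hx

lemma pvPassAux_flag (head : List Int) (l : List (Int × String)) :
    ∀ (st : PySem.Set Int × Bool), st.2 = true → (pvPassAux head l st).2 = true := by
  induction l with
  | nil => intro st h; exact h
  | cons q l ih =>
    intro st h
    rw [pvPassAux_cons]
    split
    · exact ih _ rfl
    · exact ih _ h

lemma pvPassAux_sound (dep : List String) (head : List Int) (R : Int → Prop)
    (hR : ∀ p c, R p → pvEdge dep head p c → R c) :
    ∀ (l : List (Int × String)), (∀ q ∈ l, q ∈ PySem.List.enumerate dep 1) →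
    ∀ (st : PySem.Set Int × Bool), (∀ x ∈ st.1, R x) →
    ∀ x ∈ (pvPassAux head l st).1, R x := by
  intro l
  induction l with
  | nil => intro _ st hst x hx; exact hst x hx
  | cons q l ih =>
    intro hsub st hst
    rw [pvPassAux_cons]
    split
    · rename_i hcond
      apply ih (fun r hr => hsub r (List.mem_cons_of_mem _ hr))
      intro x hx
      rcases (PySem.Set.mem_add _ _ _).1 hx with hx | hx
      · exact hst x hx
      · subst hx
        have hpar : R (PySem.List.pyGetD head (q.1 - 1) 0) :=
          hst _ ((PySem.Set.contains_iff _ _).1 hcond.1)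
        refine hR _ _ hpar ⟨q.2, ?_, rfl, hcond.2.1⟩
        have := hsub q List.mem_cons_self
        simpa using this
    · exact ih (fun r hr => hsub r (List.mem_cons_of_mem _ hr)) st hst

lemma pvPassAux_unchanged (head : List Int) (l : List (Int × String)) :
    ∀ (st : PySem.Set Int × Bool), st.2 = false → (pvPassAux head l st).2 = false →
      (pvPassAux head l st).1 = st.1 ∧
      ∀ q ∈ l, ¬ (PySem.Set.contains st.1 (PySem.List.pyGetD head (q.1 - 1) 0)
          ∧ pvExpandLabels.contains (PySem.Str.lower q.2)
          ∧ ¬ (PySem.Set.contains st.1 q.1) = true) := by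
  induction l with
  | nil => intro st _ _; exact ⟨rfl, by simp⟩
  | cons q l ih =>
    intro st hf hres
    rw [pvPassAux_cons] at hres ⊢
    split at hres
    · exact absurd (pvPassAux_flag head l _ rfl) (by rw [hres]; simp)
    · rename_i hcond
      rw [if_neg hcond]
      obtain ⟨h1, h2⟩ := ih st hf hres
      refine ⟨h1, ?_⟩
      intro p hp
      rcases List.mem_cons.1 hp with rfl | hp
      · exact hcond
      · exact h2 p hp

lemma pvPassAux_changed (head : List Int) (l : List (Int × String)) :
    ∀ (st : PySem.Set Int × Bool), st.2 = false → (pvPassAux head l st).2 = true →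
      ∃ i, i ∈ l.map Prod.fst ∧ i ∉ st.1 ∧ i ∈ (pvPassAux head l st).1 := by
  induction l with
  | nil =>
    intro st hf hres
    simp only [pvPassAux, List.foldl_nil] at hres
    rw [hf] at hres; exact absurd hres (by simp)
  | cons q l ih =>
    intro st hf hres
    rw [pvPassAux_cons] at hres ⊢
    split at hres
    · rename_i hcond
      rw [if_pos hcond]
      refine ⟨q.1, by simp, ?_, ?_⟩
      · intro hmem
        exact hcond.2.2 ((PySem.Set.contains_iff _ _).2 hmem)
      · exact pvPassAux_grow head l _ q.1 ((PySem.Set.mem_add _ _ _).2 (Or.inr rfl))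
    · rename_i hcond
      rw [if_neg hcond]
      obtain ⟨i, h1, h2, h3⟩ := ih st hf hres
      exact ⟨i, by simp [List.mem_map] at h1 ⊢; tauto, h2, h3⟩

-- ---- A side: the 'while changed' saturation ----

lemma pvSaturateA_grow (dep : List String) (head : List Int) :
    ∀ (fuel : Nat) (c : PySem.Set Int) (x : Int), x ∈ c → x ∈ pvSaturateA dep head fuel c := by
  intro fuel
  induction fuel with
  | zero => intro c x hx; exact hx
  | succ fuel ih =>
    intro c x hx
    simp only [pvSaturateA]
    split
    · exact ih _ x (by rw [pvPassA_eq]; exact pvPassAux_grow head _ _ x hx)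
    · rw [pvPassA_eq]; exact pvPassAux_grow head _ _ x hx

lemma pvSaturateA_sound (dep : List String) (head : List Int) (R : Int → Prop)
    (hR : ∀ p c, R p → pvEdge dep head p c → R c) :
    ∀ (fuel : Nat) (c : PySem.Set Int), (∀ x ∈ c, R x) →
      ∀ x ∈ pvSaturateA dep head fuel c, R x := by
  intro fuel
  induction fuel with
  | zero => intro c hc x hx; exact hc x hx
  | succ fuel ih =>
    intro c hc x hx
    simp only [pvSaturateA] at hx
    have hpass : ∀ y ∈ (pvPassA dep head (c, false)).1, R y := by
      rw [pvPassA_eq]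
      exact pvPassAux_sound dep head R hR _ (fun q hq => hq) (c, false) hc
    split at hx
    · exact ih _ hpass x hx
    · exact hpass x hx

lemma pvSaturateA_closed (dep : List String) (head : List Int) :
    ∀ (fuel : Nat) (c : PySem.Set Int), pvMeas dep c < fuel →
      ∀ p x, p ∈ pvSaturateA dep head fuel c → pvEdge dep head p x →
        x ∈ pvSaturateA dep head fuel c := by
  intro fuel
  induction fuel with
  | zero => intro c hm; omega
  | succ fuel ih =>
    intro c hm p x hp he
    simp only [pvSaturateA] at hp ⊢
    by_cases hch : (pvPassA dep head (c, false)).2 = true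
    · rw [if_pos hch] at hp ⊢
      refine ih _ ?_ p x hp he
      -- the changing pass strictly decreases the measure
      rw [pvPassA_eq] at hch ⊢
      obtain ⟨i, hi1, hi2, hi3⟩ := pvPassAux_changed head _ (c, false) rfl hch
      have hlt := pvMeas_lt dep c (pvPassAux head (PySem.List.enumerate dep 1) (c, false)).1
        (fun y hy => pvPassAux_grow head _ _ y hy) i hi1 hi2 hi3
      omega
    · rw [if_neg hch] at hp ⊢
      rw [pvPassA_eq] at hp hch ⊢
      have hnch : (pvPassAux head (PySem.List.enumerate dep 1) (c, false)).2 = false := by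
        simpa using hch
      obtain ⟨heq, hall⟩ := pvPassAux_unchanged head _ (c, false) rfl hnch
      rw [heq] at hp ⊢
      obtain ⟨d, hd1, hd2, hd3⟩ := he
      have := hall (x, d) hd1
      by_contra hxc
      apply this
      refine ⟨?_, hd3, ?_⟩
      · simpa [hd2] using (PySem.Set.contains_iff c p).2 hp
      · intro hc
        exact hxc ((PySem.Set.contains_iff _ _).1 hc)

lemma pvSaturateA_mem (dep : List String) (head : List Int) (b x : Int) :
    x ∈ pvSaturateA dep head (dep.length + 1) (PySem.Set.ofList [b]) ↔
      Relation.ReflTransGen (pvEdge dep head) b x := by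
  constructor
  · intro hx
    refine pvSaturateA_sound dep head (Relation.ReflTransGen (pvEdge dep head) b)
      (fun p c hp he => Relation.ReflTransGen.tail hp he) _ _ ?_ x hx
    intro y hy
    have : y = b := by simpa using (PySem.Set.mem_ofList _ _).1 hy
    rw [this]
  · intro h
    have hclosed := pvSaturateA_closed dep head (dep.length + 1) (PySem.Set.ofList [b])
      (by have := pvMeas_le dep (PySem.Set.ofList [b]); omega)
    induction h with
    | refl =>
      exact pvSaturateA_grow dep head _ _ b ((PySem.Set.mem_ofList _ _).2 (by simp))
    | tail hstep he ih => exact hclosed _ _ ih he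

-- ---- B side: the building pass splits into a dict fold and a bridge fold ----

def pvDictFold (dep : List String) (head : List Int) : PySem.Dict Int (List Int) :=
  (PySem.List.enumerate dep 1).foldl
    (fun (d : PySem.Dict Int (List Int)) q =>
      if pvExpandLabels.contains (PySem.Str.lower q.2)
      then PySem.Dict.modify d (PySem.List.pyGetD head (q.1 - 1) 0) [] (fun l => l ++ [q.1]) else d)
    PySem.Dict.empty

def pvBridgeFold (root_idx : Int) (action_idx : Int) (dep : List String) (head : List Int) : List Int :=
  (PySem.List.enumerate dep 1).foldl
    (fun (acc : List Int) q =>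
      if PySem.List.pyGetD head (q.1 - 1) 0 = root_idx
          ∧ pvBridgeLabels.contains (PySem.Str.lower q.2)
          ∧ q.1 < action_idx
      then acc ++ [q.1] else acc) []

lemma pvBuildB_eq (root_idx action_idx : Int) (dep : List String) (head : List Int) :
    pvBuildB root_idx action_idx dep head =
      (pvDictFold dep head, pvBridgeFold root_idx action_idx dep head) := by
  unfold pvBuildB pvDictFold pvBridgeFold
  rw [PySem.List.foldl_prod_mk
    (f := fun (d : PySem.Dict Int (List Int)) (q : Int × String) =>
      if pvExpandLabels.contains (PySem.Str.lower q.2)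
      then PySem.Dict.modify d (PySem.List.pyGetD head (q.1 - 1) 0) [] (fun l => l ++ [q.1]) else d)
    (g := fun (acc : List Int) (q : Int × String) =>
      if PySem.List.pyGetD head (q.1 - 1) 0 = root_idx
          ∧ pvBridgeLabels.contains (PySem.Str.lower q.2)
          ∧ q.1 < action_idx
      then acc ++ [q.1] else acc)]

-- the adjacency dict lists exactly the expandable children
lemma pvDictFold_mem (dep : List String) (head : List Int) (p c : Int) :
    c ∈ PySem.Dict.getD (pvDictFold dep head) p [] ↔ pvEdge dep head p c := by
  unfold pvDictFold
  rw [PySem.List.foldl_ite_eq_foldl_filter]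
  rw [← List.foldl_map
    (f := fun (q : Int × String) => (PySem.List.pyGetD head (q.1 - 1) 0, q.1))
    (g := fun (d : PySem.Dict Int (List Int)) (r : Int × Int) =>
      PySem.Dict.modify d r.1 [] (fun l => l ++ [r.2]))]
  rw [PySem.Dict.getD_foldl_modify_append]
  simp only [PySem.Dict.getD_empty, List.nil_append, List.mem_map, List.mem_filter, pvEdge]
  constructor
  · rintro ⟨r, ⟨⟨q, ⟨hq, hlab⟩, rfl⟩, hkey⟩, rfl⟩
    refine ⟨q.2, ?_, ?_, by simpa using hlab⟩
    · simpa using hq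
    · simpa using hkey
  · rintro ⟨d, hd, hkey, hlab⟩
    refine ⟨(p, c), ⟨⟨(c, d), ⟨hd, by simpa using hlab⟩, ?_⟩, by simp⟩, rfl⟩
    simp [hkey]

-- ---- B side: one BFS level ----

def pvInnerB (cs : List Int) (st : PySem.Set Int × List Int) : PySem.Set Int × List Int :=
  cs.foldl
    (fun (st : PySem.Set Int × List Int) c =>
      if PySem.Set.contains st.1 c then st else (PySem.Set.add st.1 c, st.2 ++ [c])) st

lemma pvInnerB_cons (c : Int) (cs : List Int) (st : PySem.Set Int × List Int) :
    pvInnerB (c :: cs) st =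
      pvInnerB cs (if PySem.Set.contains st.1 c then st else (PySem.Set.add st.1 c, st.2 ++ [c])) := rfl

lemma pvInnerB_grow (cs : List Int) :
    ∀ (st : PySem.Set Int × List Int) (x : Int), x ∈ st.1 → x ∈ (pvInnerB cs st).1 := by
  induction cs with
  | nil => intro st x hx; exact hx
  | cons c cs ih =>
    intro st x hx
    rw [pvInnerB_cons]
    split
    · exact ih _ x hx
    · exact ih _ x ((PySem.Set.mem_add _ _ _).2 (Or.inl hx))

lemma pvInnerB_sub (cs : List Int) :
    ∀ (st : PySem.Set Int × List Int) (x : Int), x ∈ (pvInnerB cs st).1 → x ∈ st.1 ∨ x ∈ cs := by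
  induction cs with
  | nil => intro st x hx; exact Or.inl hx
  | cons c cs ih =>
    intro st x hx
    rw [pvInnerB_cons] at hx
    split at hx
    · exact (ih _ x hx).imp id (List.mem_cons_of_mem c)
    · rcases ih _ x hx with h | h
      · rcases (PySem.Set.mem_add _ _ _).1 h with h | h
        · exact Or.inl h
        · exact Or.inr (by simp [h])
      · exact Or.inr (List.mem_cons_of_mem c h)

lemma pvInnerB_new (cs : List Int) :
    ∀ (st : PySem.Set Int × List Int) (x : Int),
      x ∈ (pvInnerB cs st).2 → x ∈ st.2 ∨ (x ∈ (pvInnerB cs st).1 ∧ x ∉ st.1) := by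
  induction cs with
  | nil => intro st x hx; exact Or.inl hx
  | cons c cs ih =>
    intro st x hx
    rw [pvInnerB_cons] at hx ⊢
    by_cases hc : PySem.Set.contains st.1 c = true
    · rw [if_pos hc] at hx ⊢; exact ih _ x hx
    · rw [if_neg hc] at hx ⊢
      rcases ih _ x hx with h | h
      · rcases List.mem_append.1 h with h | h
        · exact Or.inl h
        · have hxc : x = c := by simpa using h
          refine Or.inr ⟨pvInnerB_grow cs _ x
            (by rw [hxc]; exact (PySem.Set.mem_add _ _ _).2 (Or.inr rfl)), ?_⟩
          intro hmem
          rw [hxc] at hmem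
          exact hc ((PySem.Set.contains_iff _ _).2 hmem)
      · refine Or.inr ⟨h.1, ?_⟩
        intro hmem
        exact h.2 ((PySem.Set.mem_add _ _ _).2 (Or.inl hmem))

lemma pvInnerB_cover (cs : List Int) :
    ∀ (st : PySem.Set Int × List Int), ∀ c ∈ cs, c ∈ (pvInnerB cs st).1 := by
  induction cs with
  | nil => intro st c hc; simp at hc
  | cons c cs ih =>
    intro st c' hc'
    rw [pvInnerB_cons]
    rcases List.mem_cons.1 hc' with rfl | hc'
    · split
      · rename_i h
        exact pvInnerB_grow cs _ c' ((PySem.Set.contains_iff _ _).1 h)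
      · exact pvInnerB_grow cs _ c' ((PySem.Set.mem_add _ _ _).2 (Or.inr rfl))
    · exact ih _ c' hc'

lemma pvInnerB_acc (cs : List Int) :
    ∀ (st : PySem.Set Int × List Int) (x : Int), x ∈ st.2 → x ∈ (pvInnerB cs st).2 := by
  induction cs with
  | nil => intro st x hx; exact hx
  | cons c cs ih =>
    intro st x hx
    rw [pvInnerB_cons]
    split
    · exact ih _ x hx
    · exact ih _ x (List.mem_append.2 (Or.inl hx))

lemma pvInnerB_vis (cs : List Int) :
    ∀ (st : PySem.Set Int × List Int) (x : Int),
      x ∈ (pvInnerB cs st).1 → x ∈ st.1 ∨ x ∈ (pvInnerB cs st).2 := by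
  induction cs with
  | nil => intro st x hx; exact Or.inl hx
  | cons c cs ih =>
    intro st x hx
    rw [pvInnerB_cons] at hx ⊢
    by_cases h : PySem.Set.contains st.1 c = true
    · rw [if_pos h] at hx ⊢; exact ih _ x hx
    · rw [if_neg h] at hx ⊢
      rcases ih _ x hx with hv | hv
      · rcases (PySem.Set.mem_add _ _ _).1 hv with hv | hv
        · exact Or.inl hv
        · exact Or.inr (pvInnerB_acc cs _ x (List.mem_append.2 (Or.inr (by simp [hv]))))
      · exact Or.inr hv

-- ---- round-level facts (fold of pvInnerB over the frontier) ----

lemma pvRoundB_cons (children : PySem.Dict Int (List Int)) (p : Int) (fr : List Int)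
    (st : PySem.Set Int × List Int) :
    pvRoundB children (p :: fr) st =
      pvRoundB children fr (pvInnerB (PySem.Dict.getD children p []) st) := rfl

lemma pvRoundB_grow (children : PySem.Dict Int (List Int)) (frontier : List Int) :
    ∀ (st : PySem.Set Int × List Int) (x : Int), x ∈ st.1 → x ∈ (pvRoundB children frontier st).1 := by
  induction frontier with
  | nil => intro st x hx; exact hx
  | cons p fr ih =>
    intro st x hx
    rw [pvRoundB_cons]
    exact ih _ x (pvInnerB_grow _ _ x hx)

lemma pvRoundB_acc (children : PySem.Dict Int (List Int)) (frontier : List Int) :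
    ∀ (st : PySem.Set Int × List Int) (x : Int), x ∈ st.2 → x ∈ (pvRoundB children frontier st).2 := by
  induction frontier with
  | nil => intro st x hx; exact hx
  | cons p fr ih =>
    intro st x hx
    rw [pvRoundB_cons]
    exact ih _ x (pvInnerB_acc _ _ x hx)

lemma pvRoundB_sub (children : PySem.Dict Int (List Int)) (frontier : List Int) :
    ∀ (st : PySem.Set Int × List Int) (x : Int), x ∈ (pvRoundB children frontier st).1 →
      x ∈ st.1 ∨ ∃ p ∈ frontier, x ∈ PySem.Dict.getD children p [] := by
  induction frontier with
  | nil => intro st x hx; exact Or.inl hx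
  | cons p fr ih =>
    intro st x hx
    rw [pvRoundB_cons] at hx
    rcases ih _ x hx with h | h
    · rcases pvInnerB_sub _ _ x h with h | h
      · exact Or.inl h
      · exact Or.inr ⟨p, List.mem_cons_self, h⟩
    · obtain ⟨p', hp', hx'⟩ := h
      exact Or.inr ⟨p', List.mem_cons_of_mem _ hp', hx'⟩

lemma pvRoundB_new (children : PySem.Dict Int (List Int)) (frontier : List Int) :
    ∀ (st : PySem.Set Int × List Int) (x : Int), x ∈ (pvRoundB children frontier st).2 →
      x ∈ st.2 ∨ (x ∈ (pvRoundB children frontier st).1 ∧ x ∉ st.1) := by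
  induction frontier with
  | nil => intro st x hx; exact Or.inl hx
  | cons p fr ih =>
    intro st x hx
    rw [pvRoundB_cons] at hx ⊢
    rcases ih _ x hx with h | h
    · rcases pvInnerB_new _ _ x h with h | h
      · exact Or.inl h
      · exact Or.inr ⟨pvRoundB_grow children fr _ x h.1, h.2⟩
    · exact Or.inr ⟨h.1, fun hmem => h.2 (pvInnerB_grow _ _ x hmem)⟩

lemma pvRoundB_cover (children : PySem.Dict Int (List Int)) (frontier : List Int) :
    ∀ (st : PySem.Set Int × List Int), ∀ p ∈ frontier, ∀ c ∈ PySem.Dict.getD children p [],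
      c ∈ (pvRoundB children frontier st).1 := by
  induction frontier with
  | nil => intro st p hp; simp at hp
  | cons p fr ih =>
    intro st p' hp' c hc
    rw [pvRoundB_cons]
    rcases List.mem_cons.1 hp' with rfl | hp'
    · exact pvRoundB_grow children fr _ c (pvInnerB_cover _ _ c hc)
    · exact ih _ p' hp' c hc

lemma pvRoundB_vis (children : PySem.Dict Int (List Int)) (frontier : List Int) :
    ∀ (st : PySem.Set Int × List Int) (x : Int), x ∈ (pvRoundB children frontier st).1 →
      x ∈ st.1 ∨ x ∈ (pvRoundB children frontier st).2 := by
  induction frontier with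
  | nil => intro st x hx; exact Or.inl hx
  | cons p fr ih =>
    intro st x hx
    rw [pvRoundB_cons] at hx ⊢
    rcases ih _ x hx with h | h
    · rcases pvInnerB_vis _ _ x h with h | h
      · exact Or.inl h
      · exact Or.inr (pvRoundB_acc children fr _ x h)
    · exact Or.inr h

-- ---- the bounded breadth-first loop ----

lemma pvBFSB_nil (children : PySem.Dict Int (List Int)) :
    ∀ (fuel : Nat) (visited : PySem.Set Int), pvBFSB children fuel visited [] = visited := by
  intro fuel visited
  cases fuel with
  | zero => rfl
  | succ k => simp [pvBFSB]

lemma pvBFSB_grow (children : PySem.Dict Int (List Int)) :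
    ∀ (fuel : Nat) (visited : PySem.Set Int) (frontier : List Int) (x : Int),
      x ∈ visited → x ∈ pvBFSB children fuel visited frontier := by
  intro fuel
  induction fuel with
  | zero => intro visited frontier x hx; exact hx
  | succ k ih =>
    intro visited frontier x hx
    simp only [pvBFSB]
    split
    · exact hx
    · exact ih _ _ x (pvRoundB_grow children frontier _ x hx)

lemma pvBFSB_sound (dep : List String) (head : List Int) (children : PySem.Dict Int (List Int))
    (hC : ∀ p c, c ∈ PySem.Dict.getD children p [] ↔ pvEdge dep head p c)
    (R : Int → Prop) (hR : ∀ p c, R p → pvEdge dep head p c → R c) :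
    ∀ (fuel : Nat) (visited : PySem.Set Int) (frontier : List Int),
      (∀ x ∈ visited, R x) → (∀ p ∈ frontier, R p) →
      ∀ x ∈ pvBFSB children fuel visited frontier, R x := by
  intro fuel
  induction fuel with
  | zero => intro visited frontier hv _ x hx; exact hv x hx
  | succ k ih =>
    intro visited frontier hv hf x hx
    simp only [pvBFSB] at hx
    split at hx
    · exact hv x hx
    · have hv' : ∀ y ∈ (pvRoundB children frontier (visited, [])).1, R y := by
        intro y hy
        rcases pvRoundB_sub children frontier _ y hy with h | h
        · exact hv y h
        · obtain ⟨p, hp, hc⟩ := h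
          exact hR p y (hf p hp) ((hC p y).1 hc)
      refine ih _ _ hv' ?_ x hx
      intro p hp
      rcases pvRoundB_new children frontier _ p hp with h | h
      · simp at h
      · exact hv' p h.1

lemma pvBFSB_closed (dep : List String) (head : List Int) (children : PySem.Dict Int (List Int))
    (hC : ∀ p c, c ∈ PySem.Dict.getD children p [] ↔ pvEdge dep head p c) :
    ∀ (fuel : Nat) (visited : PySem.Set Int) (frontier : List Int),
      (∀ p ∈ frontier, p ∈ visited) →
      (∀ p ∈ visited, p ∉ frontier → ∀ c, pvEdge dep head p c → c ∈ visited) →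
      pvMeas dep visited ≤ fuel →
      ∀ p x, p ∈ pvBFSB children fuel visited frontier → pvEdge dep head p x →
        x ∈ pvBFSB children fuel visited frontier := by
  intro fuel
  induction fuel with
  | zero =>
    intro visited frontier _ _ hm p x hp he
    -- fuel exhausted: the measure is 0, so every candidate index is already visited
    have hm0 : pvMeas dep visited = 0 := Nat.le_zero.1 hm
    obtain ⟨d, hd, _, _⟩ := he
    have hx : x ∈ (PySem.List.enumerate dep 1).map Prod.fst := by
      simp only [List.mem_map]; exact ⟨(x, d), hd, rfl⟩
    by_contra hxn
    have : x ∈ ((PySem.List.enumerate dep 1).map Prod.fst).toFinset \ visited.toFinset := by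
      simp only [Finset.mem_sdiff, List.mem_toFinset]
      exact ⟨hx, hxn⟩
    have := Finset.card_pos.2 ⟨x, this⟩
    unfold pvMeas at hm0
    omega
  | succ k ih =>
    intro visited frontier hI2 hI3 hm p x hp he
    simp only [pvBFSB] at hp ⊢
    by_cases hfr : frontier = []
    · rw [if_pos hfr] at hp ⊢
      exact hI3 p hp (by rw [hfr]; simp) x he
    · rw [if_neg hfr] at hp ⊢
      by_cases hnxt : (pvRoundB children frontier (visited, [])).2 = []
      · -- no new nodes: the visited set is already saturated
        rw [hnxt] at hp ⊢
        rw [pvBFSB_nil] at hp ⊢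
        have hvis : p ∈ visited := by
          rcases pvRoundB_vis children frontier _ p hp with h | h
          · exact h
          · rw [hnxt] at h; simp at h
        by_cases hpf : p ∈ frontier
        · exact pvRoundB_cover children frontier _ p hpf x ((hC p x).2 he)
        · exact pvRoundB_grow children frontier _ x (hI3 p hvis hpf x he)
      · -- some node was added: measure strictly decreased
        obtain ⟨y, hy⟩ := List.exists_mem_of_ne_nil _ hnxt
        have hynew := pvRoundB_new children frontier _ y hy
        simp only [List.not_mem_nil, false_or] at hynew
        have hycand : y ∈ (PySem.List.enumerate dep 1).map Prod.fst := by
          rcases pvRoundB_sub children frontier _ y hynew.1 with h | h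
          · exact absurd h hynew.2
          · obtain ⟨q, _, hq⟩ := h
            obtain ⟨d, hd, _, _⟩ := (hC q y).1 hq
            simp only [List.mem_map]; exact ⟨(y, d), hd, rfl⟩
        have hlt := pvMeas_lt dep visited (pvRoundB children frontier (visited, [])).1
          (fun z hz => pvRoundB_grow children frontier _ z hz) y hycand hynew.2 hynew.1
        refine ih _ _ ?_ ?_ (by omega) p x hp he
        · intro q hq
          rcases pvRoundB_new children frontier _ q hq with h | h
          · simp at h
          · exact h.1
        · intro q hq hqf c hec
          by_cases hqv : q ∈ visited
          · by_cases hqfr : q ∈ frontier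
            · exact pvRoundB_cover children frontier _ q hqfr c ((hC q c).2 hec)
            · exact pvRoundB_grow children frontier _ c (hI3 q hqv hqfr c hec)
          · rcases pvRoundB_vis children frontier _ q hq with h | h
            · exact absurd h hqv
            · exact absurd h hqf

lemma pvBFSB_mem (dep : List String) (head : List Int) (children : PySem.Dict Int (List Int))
    (hC : ∀ p c, c ∈ PySem.Dict.getD children p [] ↔ pvEdge dep head p c)
    (bridges : List Int) (x : Int) :
    x ∈ pvBFSB children dep.length (PySem.Set.ofList bridges) bridges ↔
      ∃ b ∈ bridges, Relation.ReflTransGen (pvEdge dep head) b x := by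
  constructor
  · intro hx
    refine pvBFSB_sound dep head children hC
      (fun y => ∃ b ∈ bridges, Relation.ReflTransGen (pvEdge dep head) b y)
      (fun p c hp he => by obtain ⟨b, hb, hr⟩ := hp; exact ⟨b, hb, hr.tail he⟩)
      _ _ _ ?_ ?_ x hx
    · intro y hy
      exact ⟨y, (PySem.Set.mem_ofList _ _).1 hy, Relation.ReflTransGen.refl⟩
    · intro p hp
      exact ⟨p, hp, Relation.ReflTransGen.refl⟩
  · rintro ⟨b, hb, hr⟩
    have hclosed := pvBFSB_closed dep head children hC dep.length (PySem.Set.ofList bridges) bridges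
      (fun p hp => (PySem.Set.mem_ofList _ _).2 hp)
      (fun p hp hpf _ _ => absurd ((PySem.Set.mem_ofList _ _).1 hp) hpf)
      (pvMeas_le dep _)
    induction hr with
    | refl => exact pvBFSB_grow children _ _ _ b ((PySem.Set.mem_ofList _ _).2 hb)
    | tail hstep he ih2 => exact hclosed _ _ ih2 he

-- ---- final assembly ----

lemma pvWalkB_eq_pvPathA (head : List Int) (root : Int) :
    ∀ (fuel : Nat) (cur : Int) (seen : PySem.Set Int) (trail : List Int),
      pvWalkB head root fuel cur seen trail = pvPathA head root fuel cur seen trail := by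
  intro fuel
  induction fuel with
  | zero => intro cur seen trail; rfl
  | succ f ih =>
    intro cur seen trail
    simp only [pvWalkB, pvPathA]
    split
    · split
      · rfl
      · exact ih _ _ _
    · rfl

lemma pvBridgesA_eq (root_idx action_idx : Int) (dep : List String) (head : List Int)
    (h : ¬ action_idx = -1) :
    (PySem.List.enumerate dep 1).foldl
      (fun (acc : List Int) q =>
        if PySem.List.pyGetD head (q.1 - 1) 0 = root_idx
            ∧ pvBridgeLabels.contains (PySem.Str.lower q.2)
            ∧ (q.1 < action_idx ∨ action_idx = -1)
        then acc ++ [q.1] else acc) [] = pvBridgeFold root_idx action_idx dep head := by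
  unfold pvBridgeFold
  apply PySem.List.foldl_congr_mem
  intro acc q _
  refine if_congr ?_ rfl rfl
  constructor
  · rintro ⟨h1, h2, h3⟩; exact ⟨h1, h2, h3.resolve_right h⟩
  · rintro ⟨h1, h2, h3⟩; exact ⟨h1, h2, Or.inl h3⟩

lemma pvFoldUpd_mem (dep : List String) (head : List Int) (bs : List Int) :
    ∀ (s : PySem.Set Int) (x : Int),
      x ∈ bs.foldl (fun (s : PySem.Set Int) b => PySem.Set.update s (pvExpandA [b] dep head)) s ↔
        x ∈ s ∨ ∃ b ∈ bs, x ∈ pvExpandA [b] dep head := by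
  induction bs with
  | nil => simp
  | cons b bs ih =>
    intro s x
    simp only [List.foldl_cons]
    rw [ih]
    rw [PySem.Set.mem_update]
    simp only [List.mem_cons]
    constructor
    · rintro (⟨h | h⟩ | ⟨b', hb', hx⟩)
      · exact Or.inl h
      · exact Or.inr ⟨b, Or.inl rfl, h⟩
      · exact Or.inr ⟨b', Or.inr hb', hx⟩
    · rintro (h | ⟨b', hb' | hb', hx⟩)
      · exact Or.inl (Or.inl h)
      · subst hb'; exact Or.inl (Or.inr hx)
      · exact Or.inr ⟨b', hb', hx⟩

lemma pvFoldUpd_nodup (dep : List String) (head : List Int) (bs : List Int) :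
    ∀ (s : PySem.Set Int), s.Nodup →
      (bs.foldl (fun (s : PySem.Set Int) b => PySem.Set.update s (pvExpandA [b] dep head)) s).Nodup := by
  induction bs with
  | nil => intro s h; exact h
  | cons b bs ih =>
    intro s h
    simp only [List.foldl_cons]
    exact ih _ (PySem.Set.nodup_update _ _ h)

lemma pvExpandA_mem (dep : List String) (head : List Int) (b x : Int) :
    x ∈ pvExpandA [b] dep head ↔ Relation.ReflTransGen (pvEdge dep head) b x := by
  unfold pvExpandA
  rw [if_neg (by simp)]
  rw [PySem.List.mem_sorted]
  exact pvSaturateA_mem dep head b x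

-- ===== VERDICT (by name: the statement is the Claim_ definition above) =====
theorem collect_relation_bridge_indices_spec : Claim_equal_collect_relation_bridge_indices := by
  intro root_idx action_idx dep head _ _
  unfold Spec_collect_relation_bridge_indices
  by_cases hact : action_idx = -1
  · simp [collect_relation_bridge_indices, collect_relation_bridge_indices_alt, hact]
  · simp only [collect_relation_bridge_indices, collect_relation_bridge_indices_alt, if_neg hact,
      pvBuildB_eq]
    rw [pvBridgesA_eq root_idx action_idx dep head hact]
    rw [pvWalkB_eq_pvPathA]
    apply PySem.List.sorted_eq_sorted_of_perm _ _ _ (fun a b h => h)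
    simp only [PySem.Set.empty]
    rw [List.perm_ext_iff_of_nodup
      (pvFoldUpd_nodup dep head _ _ (PySem.Set.nodup_update _ _ List.nodup_nil))
      (PySem.Set.nodup_update _ _ (PySem.Set.nodup_update _ _ List.nodup_nil))]
    · intro a
      rw [pvFoldUpd_mem]
      rw [PySem.Set.mem_update, PySem.Set.mem_update, PySem.Set.mem_update]
      rw [pvBFSB_mem dep head _ (pvDictFold_mem dep head) _ a]
      simp only [pvExpandA_mem, List.not_mem_nil, false_or]
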